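-- pv_equiv track=rewrite | github.com/stuagano/wolf-goat-pig | backend/app/services/scorecard_scan_service.py | _compute_per_hole_deltas
-- ===== SOURCE A (Python) =====
-- def _compute_per_hole_deltas(running_totals_for_player: list[dict], num_holes: int = 18) -> list[dict]:
--     """Convert running totals to per-hole deltas, filling missing holes as carry-overs (delta=0)."""
--     by_hole = {entry["hole"]: entry for entry in running_totals_for_player}
--     deltas = []
--     prev = 0
--     for hole in range(1, num_holes + 1):
--         if hole in by_hole:
--             entry = by_hole[hole]
--             val = -abs(entry["value"]) if entry.get("is_circled") else entry["value"]
--         else: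
--             # Missing hole = carry-over, running total unchanged
--             val = prev
--         delta = val - prev
--         prev = val
--         deltas.append({"hole": hole, "quarters": delta})
--     return deltas
-- ===== SOURCE B (Python) =====
-- def _compute_per_hole_deltas(running_totals_for_player: list[dict], num_holes: int = 18) -> list[dict]:
--     """Sort-then-scan: compute deltas only at the holes that actually carry an entry
--     (scanning them in increasing order), then fill every other hole with delta 0."""
--     latest = {}
--     for entry in running_totals_for_player:
--         latest[entry["hole"]] = entry
--     delta_at = {}
--     prev = 0
--     for hole in sorted(h for h in latest if 1 <= h <= num_holes):
--         e = latest[hole]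
--         val = -abs(e["value"]) if e.get("is_circled") else e["value"]
--         delta_at[hole] = val - prev
--         prev = val
--     return [{"hole": h, "quarters": delta_at.get(h, 0)} for h in range(1, num_holes + 1)]
-- ===== Notes on version B (the rewrite author's own statement) =====
-- stated objective: alternative
-- what changed: A loops over every hole 1..num_holes threading a carry accumulator that recomputes the running total at each hole; B sorts the holes that actually carry an entry, computes deltas only at those holes in one scan over the sorted list, and fills all remaining holes with delta 0 via a default lookup.
import Mathlib
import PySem

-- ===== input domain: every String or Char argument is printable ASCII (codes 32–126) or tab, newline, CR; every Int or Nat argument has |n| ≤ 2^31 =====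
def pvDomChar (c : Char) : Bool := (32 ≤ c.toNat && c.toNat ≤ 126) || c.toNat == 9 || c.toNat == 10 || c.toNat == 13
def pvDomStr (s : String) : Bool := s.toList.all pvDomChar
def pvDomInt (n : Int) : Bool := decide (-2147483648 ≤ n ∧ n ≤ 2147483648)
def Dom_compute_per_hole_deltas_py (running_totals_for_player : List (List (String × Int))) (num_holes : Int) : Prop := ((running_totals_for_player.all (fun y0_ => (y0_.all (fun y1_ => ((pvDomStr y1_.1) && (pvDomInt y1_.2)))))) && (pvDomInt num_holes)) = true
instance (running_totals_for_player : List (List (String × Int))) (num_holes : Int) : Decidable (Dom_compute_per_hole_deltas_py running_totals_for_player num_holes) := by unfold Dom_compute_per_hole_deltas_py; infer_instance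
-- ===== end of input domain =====

-- B replaces A's carry-accumulator loop over every hole 1..num_holes by a sort-then-scan:
-- deltas are computed once per PRESENT in-range hole (scanned in sorted order) into a
-- delta dict, and the output fills the remaining holes with delta 0 (objective: alternative).

-- ===== PORT A =====
def compute_per_hole_deltas_py (running_totals_for_player : List (List (String × Int))) (num_holes : Int) : List (List (String × Int)) :=
  let by_hole : PySem.Dict Int (List (String × Int)) :=
    running_totals_for_player.foldl
      (fun d entry => d.insert ((PySem.Dict.get? (PySem.Dict.mk entry) "hole").getD 0) entry)
      PySem.Dict.empty
  ((PySem.List.pyRange 1 (num_holes + 1) 1).foldl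
      (fun (st : List (List (String × Int)) × Int) hole =>
        let val : Int :=
          match PySem.Dict.get? by_hole hole with
          | some entry =>
              if ((PySem.Dict.get? (PySem.Dict.mk entry) "is_circled").getD 0) ≠ 0 then
                -|((PySem.Dict.get? (PySem.Dict.mk entry) "value").getD 0)|
              else
                (PySem.Dict.get? (PySem.Dict.mk entry) "value").getD 0
          | none => st.2
        (st.1 ++ [[("hole", hole), ("quarters", val - st.2)]], val))
      ([], 0)).1

-- ===== PORT B =====
def compute_per_hole_deltas_py_alt (running_totals_for_player : List (List (String × Int))) (num_holes : Int) : List (List (String × Int)) :=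
  let latest : PySem.Dict Int (List (String × Int)) :=
    running_totals_for_player.foldl
      (fun d entry => d.insert ((PySem.Dict.get? (PySem.Dict.mk entry) "hole").getD 0) entry)
      PySem.Dict.empty
  let delta_at : PySem.Dict Int Int :=
    ((PySem.List.sorted ((PySem.Dict.keys latest).filter
          (fun h => decide (1 ≤ h) && decide (h ≤ num_holes))) (fun h => h) false).foldl
      (fun (st : PySem.Dict Int Int × Int) hole =>
        let e : List (String × Int) := (PySem.Dict.get? latest hole).getD []
        let val : Int :=
          if ((PySem.Dict.get? (PySem.Dict.mk e) "is_circled").getD 0) ≠ 0 then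
            -|((PySem.Dict.get? (PySem.Dict.mk e) "value").getD 0)|
          else
            (PySem.Dict.get? (PySem.Dict.mk e) "value").getD 0
        (st.1.insert hole (val - st.2), val))
      (PySem.Dict.empty, 0)).1
  (PySem.List.pyRange 1 (num_holes + 1) 1).map
    (fun h => [("hole", h), ("quarters", PySem.Dict.getD delta_at h 0)])

-- ===== PRECONDITION & SPEC =====
-- Pre_ excludes exactly the inputs where the Python A raises KeyError: an entry without a
-- "hole" key, or an entry that is the last one carrying some in-range hole but has no
-- "value" key (B raises there too).
def Pre_compute_per_hole_deltas_py (running_totals_for_player : List (List (String × Int))) (num_holes : Int) : Prop :=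
  ∀ p ∈ PySem.List.enumerate running_totals_for_player,
    (PySem.Dict.get? (PySem.Dict.mk p.2) "hole").isSome ∧
    (1 ≤ (PySem.Dict.get? (PySem.Dict.mk p.2) "hole").getD 0 →
     (PySem.Dict.get? (PySem.Dict.mk p.2) "hole").getD 0 ≤ num_holes →
     (∀ q ∈ PySem.List.enumerate running_totals_for_player, p.1 < q.1 →
        PySem.Dict.get? (PySem.Dict.mk q.2) "hole" ≠ PySem.Dict.get? (PySem.Dict.mk p.2) "hole") →
     (PySem.Dict.get? (PySem.Dict.mk p.2) "value").isSome)
instance (running_totals_for_player : List (List (String × Int))) (num_holes : Int) : Decidable (Pre_compute_per_hole_deltas_py running_totals_for_player num_holes) := by unfold Pre_compute_per_hole_deltas_py; infer_instance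

def pvWitness_compute_per_hole_deltas_py : (List (List (String × Int))) × Int :=
  ([[("hole", 1), ("value", 4)], [("hole", 3), ("value", 2), ("is_circled", 1)]], 4)

def Spec_compute_per_hole_deltas_py (running_totals_for_player : List (List (String × Int))) (num_holes : Int) (out : List (List (String × Int))) : Prop := out = compute_per_hole_deltas_py_alt running_totals_for_player num_holes
instance (running_totals_for_player : List (List (String × Int))) (num_holes : Int) (out : List (List (String × Int))) : Decidable (Spec_compute_per_hole_deltas_py running_totals_for_player num_holes out) := by unfold Spec_compute_per_hole_deltas_py; infer_instance

-- ===== CLAIM (what is proved, stated in full; the proofs are below) =====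
def Claim_equal_compute_per_hole_deltas_py : Prop := ∀ (running_totals_for_player : List (List (String × Int))) (num_holes : Int), Dom_compute_per_hole_deltas_py running_totals_for_player num_holes → Pre_compute_per_hole_deltas_py running_totals_for_player num_holes → Spec_compute_per_hole_deltas_py running_totals_for_player num_holes (compute_per_hole_deltas_py running_totals_for_player num_holes)

-- ===== LEMMAS AND PROOFS =====

-- A's effective running total at a hole, given the previous total
def pvVal (D : PySem.Dict Int (List (String × Int))) (p hole : Int) : Int :=
  match PySem.Dict.get? D hole with
  | some entry =>
      if ((PySem.Dict.get? (PySem.Dict.mk entry) "is_circled").getD 0) ≠ 0 then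
        -|((PySem.Dict.get? (PySem.Dict.mk entry) "value").getD 0)|
      else
        (PySem.Dict.get? (PySem.Dict.mk entry) "value").getD 0
  | none => p

-- B's effective running total at a (present) hole
def pvValP (D : PySem.Dict Int (List (String × Int))) (hole : Int) : Int :=
  let e : List (String × Int) := (PySem.Dict.get? D hole).getD []
  if ((PySem.Dict.get? (PySem.Dict.mk e) "is_circled").getD 0) ≠ 0 then
    -|((PySem.Dict.get? (PySem.Dict.mk e) "value").getD 0)|
  else
    (PySem.Dict.get? (PySem.Dict.mk e) "value").getD 0

def pvStepA (D : PySem.Dict Int (List (String × Int)))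
    (st : List (List (String × Int)) × Int) (hole : Int) : List (List (String × Int)) × Int :=
  (st.1 ++ [[("hole", hole), ("quarters", pvVal D st.2 hole - st.2)]], pvVal D st.2 hole)

def pvStepB (D : PySem.Dict Int (List (String × Int)))
    (st : PySem.Dict Int Int × Int) (hole : Int) : PySem.Dict Int Int × Int :=
  (st.1.insert hole (pvValP D hole - st.2), pvValP D hole)

def pvDict (rts : List (List (String × Int))) : PySem.Dict Int (List (String × Int)) :=
  rts.foldl
    (fun d entry => d.insert ((PySem.Dict.get? (PySem.Dict.mk entry) "hole").getD 0) entry)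
    PySem.Dict.empty

-- the sorted list of present in-range holes, bound k
def pvS (D : PySem.Dict Int (List (String × Int))) (k : Int) : List Int :=
  PySem.List.sorted ((PySem.Dict.keys D).filter (fun h => decide (1 ≤ h) && decide (h ≤ k)))
    (fun h => h) false

lemma portA_eq (rts : List (List (String × Int))) (n : Int) :
    compute_per_hole_deltas_py rts n
      = ((PySem.List.pyRange 1 (n + 1) 1).foldl (pvStepA (pvDict rts)) ([], 0)).1 := rfl

lemma portB_eq (rts : List (List (String × Int))) (n : Int) :
    compute_per_hole_deltas_py_alt rts n
      = (PySem.List.pyRange 1 (n + 1) 1).map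
          (fun h => [("hole", h),
            ("quarters",
              PySem.Dict.getD (((pvS (pvDict rts) n).foldl (pvStepB (pvDict rts))
                (PySem.Dict.empty, 0)).1) h 0)]) := rfl

lemma pvVal_of_mem (D : PySem.Dict Int (List (String × Int))) (p hole : Int)
    (h : hole ∈ PySem.Dict.keys D) : pvVal D p hole = pvValP D hole := by
  rcases hg : PySem.Dict.get? D hole with _ | e
  · exact absurd h ((PySem.Dict.get?_eq_none_iff_not_mem_keys _ _).mp hg)
  · simp [pvVal, pvValP, hg]

lemma pvVal_of_not_mem (D : PySem.Dict Int (List (String × Int))) (p hole : Int)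
    (h : hole ∉ PySem.Dict.keys D) : pvVal D p hole = p := by
  have hg : PySem.Dict.get? D hole = none := (PySem.Dict.get?_eq_none_iff_not_mem_keys _ _).mpr h
  simp [pvVal, hg]

lemma pvFilterPerm (P P' : Int → Bool) (a : Int) :
    ∀ l : List Int, l.Nodup → a ∈ l → P a = false → P' a = true →
      (∀ x ∈ l, x ≠ a → P' x = P x) → (l.filter P').Perm (l.filter P ++ [a]) := by
  intro l
  induction l with
  | nil => intro _ h; exact absurd h (List.not_mem_nil)
  | cons x xs ih =>
    intro hnd hmem hPa hP'a hc
    by_cases hxa : x = a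
    · subst hxa
      have hax : x ∉ xs := (List.nodup_cons.mp hnd).1
      rw [List.filter_cons_of_pos hP'a, List.filter_cons_of_neg (by simp [hPa])]
      have hfe : xs.filter P' = xs.filter P :=
        List.filter_congr (fun y hy => hc y (List.mem_cons_of_mem _ hy)
          (fun he => hax (he ▸ hy)))
      rw [hfe]
      exact (List.perm_append_singleton x _).symm
    · have hmx : a ∈ xs := by
        rcases List.mem_cons.mp hmem with h | h
        · exact absurd h.symm hxa
        · exact h
      have hP'x : P' x = P x := hc x List.mem_cons_self hxa
      have hrec := ih (List.nodup_cons.mp hnd).2 hmx hPa hP'a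
        (fun y hy => hc y (List.mem_cons_of_mem _ hy))
      cases hPx : P x with
      | true =>
        rw [List.filter_cons_of_pos (by rw [hP'x, hPx]), List.filter_cons_of_pos hPx]
        exact List.Perm.cons x hrec
      | false =>
        rw [List.filter_cons_of_neg (by rw [hP'x, hPx]; exact Bool.false_ne_true),
            List.filter_cons_of_neg (by rw [hPx]; exact Bool.false_ne_true)]
        exact hrec

lemma pvS_nonpos (D : PySem.Dict Int (List (String × Int))) (k : Int) (hk : k ≤ 0) :
    pvS D k = [] := by
  unfold pvS
  rw [List.filter_eq_nil_iff.mpr (fun x _ => by simp; omega)]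
  exact (PySem.List.sorted_eq_nil_iff _ _ _).mpr rfl

lemma pvS_succ_not_mem (D : PySem.Dict Int (List (String × Int))) (k : Nat)
    (h : ((k : Int) + 1) ∉ PySem.Dict.keys D) : pvS D ((k : Int) + 1) = pvS D (k : Int) := by
  unfold pvS
  congr 1
  apply List.filter_congr
  intro x hx
  have hxa : x ≠ (k : Int) + 1 := fun he => h (he ▸ hx)
  have hiff : (x ≤ (k : Int) + 1) ↔ (x ≤ (k : Int)) := by omega
  simp [hiff]

lemma pvS_succ_mem (D : PySem.Dict Int (List (String × Int))) (k : Nat)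
    (hnd : (PySem.Dict.keys D).Nodup) (h : ((k : Int) + 1) ∈ PySem.Dict.keys D) :
    pvS D ((k : Int) + 1) = pvS D (k : Int) ++ [(k : Int) + 1] := by
  apply PySem.List.sorted_eq_of_perm_of_pairwise_lt
  · have hperm := pvFilterPerm (fun h => decide (1 ≤ h) && decide (h ≤ (k : Int)))
      (fun h => decide (1 ≤ h) && decide (h ≤ (k : Int) + 1)) ((k : Int) + 1)
      (PySem.Dict.keys D) hnd h (by simp) (by simp)
      (fun x hx hxa => by
        have hiff : (x ≤ (k : Int) + 1) ↔ (x ≤ (k : Int)) := by omega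
        simp [hiff])
    exact ((PySem.List.sorted_perm _ _ _).append (List.Perm.refl _)).trans hperm.symm
  · apply List.pairwise_append.mpr
    refine ⟨?_, List.pairwise_singleton _ _, ?_⟩
    · have hle := PySem.List.sorted_pairwise
        (xs := (PySem.Dict.keys D).filter (fun h => decide (1 ≤ h) && decide (h ≤ (k : Int))))
        (key := fun h => h) 
      have hnds : (pvS D (k : Int)).Nodup := by
        unfold pvS
        exact ((PySem.List.sorted_perm _ _ _).nodup_iff).mpr (hnd.filter _)
      exact (hle.and hnds).imp (fun hp => lt_of_le_of_ne hp.1 hp.2)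
    · intro x hx y hy
      have hy' : y = (k : Int) + 1 := List.mem_singleton.mp hy
      subst hy'
      have hxf : x ∈ (PySem.Dict.keys D).filter
          (fun h => decide (1 ≤ h) && decide (h ≤ (k : Int))) :=
        (PySem.List.mem_sorted _ _ _ _).mp hx
      have := (List.mem_filter.mp hxf).2
      simp only [Bool.and_eq_true, decide_eq_true_eq] at this
      omega

lemma pvMain (D : PySem.Dict Int (List (String × Int)))
    (hnd : (PySem.Dict.keys D).Nodup) (k : Nat) :
    (((PySem.List.pyRange 1 (1 + (k : Int)) 1).foldl (pvStepA D) ([], 0)).1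
       = (PySem.List.pyRange 1 (1 + (k : Int)) 1).map
           (fun h => [("hole", h), ("quarters",
              PySem.Dict.getD (((pvS D (k : Int)).foldl (pvStepB D) (PySem.Dict.empty, 0)).1) h 0)]))
    ∧ (((PySem.List.pyRange 1 (1 + (k : Int)) 1).foldl (pvStepA D) ([], 0)).2
       = ((pvS D (k : Int)).foldl (pvStepB D) (PySem.Dict.empty, 0)).2)
    ∧ (∀ h : Int, (k : Int) < h →
        PySem.Dict.getD (((pvS D (k : Int)).foldl (pvStepB D) (PySem.Dict.empty, 0)).1) h 0 = 0) := by
  induction k with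
  | zero =>
    rw [PySem.List.pyRange_one_eq_nil (by omega)]
    rw [show ((0 : Nat) : Int) = 0 from rfl, pvS_nonpos D 0 le_rfl]
    exact ⟨rfl, rfl, fun h _ => by simp [PySem.Dict.getD_empty]⟩
  | succ k ih =>
    obtain ⟨ha, hb, hc⟩ := ih
    have hcast : 1 + ((k + 1 : Nat) : Int) = (1 + (k : Int)) + 1 := by push_cast; ring
    have hcast2 : ((k + 1 : Nat) : Int) = (k : Int) + 1 := by push_cast; ring
    rw [hcast, hcast2, PySem.List.pyRange_one_succ_right (by omega),
        List.foldl_append, List.map_append]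
    simp only [List.foldl_cons, List.foldl_nil, List.map_cons, List.map_nil]
    have hhole : (1 : Int) + (k : Int) = (k : Int) + 1 := by ring
    by_cases hmem : ((k : Int) + 1) ∈ PySem.Dict.keys D
    · rw [pvS_succ_mem D k hnd hmem, List.foldl_append]
      simp only [List.foldl_cons, List.foldl_nil]
      refine ⟨?_, ?_, ?_⟩
      · show _ ++ _ = _ ++ _
        congr 1
        · rw [ha]
          apply List.map_congr_left
          intro x hx
          have hxb := (PySem.List.mem_pyRange_one).mp hx
          have hxne : x ≠ (k : Int) + 1 := by omega
          simp only [pvStepB]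
          rw [PySem.Dict.getD_insert, if_neg hxne]
        · simp only [pvStepB]
          rw [pvVal_of_mem D _ _ (by rw [hhole]; exact hmem), hb, hhole,
              PySem.Dict.getD_insert, if_pos rfl]
      · simp only [pvStepA, pvStepB]
        rw [pvVal_of_mem D _ _ (by rw [hhole]; exact hmem), hhole]
      · intro h hh
        simp only [pvStepB]
        rw [PySem.Dict.getD_insert, if_neg (by omega : ¬ h = (k : Int) + 1)]
        exact hc h (by omega)
    · rw [pvS_succ_not_mem D k hmem]
      refine ⟨?_, ?_, ?_⟩
      · show _ ++ _ = _ ++ _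
        rw [ha, pvVal_of_not_mem D _ _ (by rw [hhole]; exact hmem),
            hc (1 + (k : Int)) (by omega)]
        simp
      · simp only [pvStepA]
        rw [pvVal_of_not_mem D _ _ (by rw [hhole]; exact hmem), hb]
      · intro h hh
        exact hc h (by omega)

-- ===== VERDICT (by name: the statement is the Claim_ definition above) =====
theorem compute_per_hole_deltas_py_spec : Claim_equal_compute_per_hole_deltas_py := by
  intro rts n _hdom _hpre
  unfold Spec_compute_per_hole_deltas_py
  rw [portA_eq, portB_eq]
  by_cases hn : n ≤ 0
  · rw [PySem.List.pyRange_one_eq_nil (by omega)]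
    rfl
  · have hnd : (PySem.Dict.keys (pvDict rts)).Nodup := by
      unfold pvDict
      exact PySem.Dict.nodup_keys_foldl_insert_key _ _ _ _ PySem.Dict.nodup_keys_empty
    have hc2 : n = ((n.toNat : Nat) : Int) := by omega
    rw [hc2, show ((n.toNat : Nat) : Int) + 1 = 1 + ((n.toNat : Nat) : Int) by ring]
    exact (pvMain (pvDict rts) hnd n.toNat).1
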